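-- pv_equiv track=rewrite | github.com/narcisseuuh/challenges-404CTF-2024 | nanocombattants/src/son/packman.py | xor_parts
-- ===== SOURCE A (Python) =====
-- def find_0xcc(list):
--     index = []
--     for i in range(len(list)):
--         if list[i] == 0xcc and list[i+1] == 0x90:
--             index.append(i)
--     return index
--
-- def xor_parts(shellcode, xor_keys):
--     cces = find_0xcc(shellcode)
--     res = []
--     for i in range(len(shellcode)):
--         if (i in cces):
--             res.append(shellcode[i])
--         else:
--             res.append(shellcode[i] ^ xor_keys[i])
--     return res
-- ===== SOURCE B (Python) =====
-- def xor_parts(shellcode, xor_keys):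
--     n = len(shellcode)
--     return [b if b == 0xcc and i + 1 < n and shellcode[i + 1] == 0x90
--             else b ^ xor_keys[i]
--             for i, b in enumerate(shellcode)]
-- ===== Notes on version B (the rewrite author's own statement) =====
-- stated objective: simpler
-- what changed: Dropped the find_0xcc helper and its precomputed marker-index list: B is one fused pass over enumerate(shellcode) that tests the marker condition inline, instead of A's table-build pass followed by a scan with an 'i in cces' membership test.
-- crash fix: When the last shellcode byte is 0xcc (and xor_keys covers every non-marker index) A's find_0xcc raises IndexError on shellcode[i+1]; B returns the list with that final byte XORed. — e.g. on xor_parts([204], [5]): A raises IndexError, B returns [201]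
import Mathlib
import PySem

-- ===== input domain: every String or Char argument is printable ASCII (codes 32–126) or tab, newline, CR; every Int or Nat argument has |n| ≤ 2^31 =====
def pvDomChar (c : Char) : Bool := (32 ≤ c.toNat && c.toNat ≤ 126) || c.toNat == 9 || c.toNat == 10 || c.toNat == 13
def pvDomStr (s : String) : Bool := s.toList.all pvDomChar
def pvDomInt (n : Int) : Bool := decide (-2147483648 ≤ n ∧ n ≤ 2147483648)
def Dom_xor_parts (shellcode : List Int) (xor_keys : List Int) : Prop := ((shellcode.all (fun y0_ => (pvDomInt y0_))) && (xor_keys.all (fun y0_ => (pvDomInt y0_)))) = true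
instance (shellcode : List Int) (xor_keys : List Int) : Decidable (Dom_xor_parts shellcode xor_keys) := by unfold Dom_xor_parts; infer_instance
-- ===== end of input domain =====

-- B drops A's find_0xcc helper and its precomputed marker-index list: one fused pass over
-- enumerate(shellcode) testing the marker condition inline ('simpler'; no speed claim).

-- ===== PORT A =====
-- list[i+1] is ported as pyGetD … 0: out of range Python raises IndexError (excluded by Pre_);
-- in range the value is exact.
def find_0xcc (list : List Int) : List Int :=
  (PySem.List.pyRange 0 (PySem.List.len list) 1).foldl
    (fun index i =>
      if PySem.List.pyGetD list i 0 = 204 ∧ PySem.List.pyGetD list (i + 1) 0 = 144 then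
        index ++ [i]
      else index) []

def xor_parts (shellcode : List Int) (xor_keys : List Int) : List Int :=
  let cces := find_0xcc shellcode
  (PySem.List.pyRange 0 (PySem.List.len shellcode) 1).foldl
    (fun res i =>
      if i ∈ cces then res ++ [PySem.List.pyGetD shellcode i 0]
      else res ++ [PySem.Int.bxor (PySem.List.pyGetD shellcode i 0) (PySem.List.pyGetD xor_keys i 0)]) []

-- ===== PORT B =====
-- xor_keys[i] / shellcode[i+1] ported as pyGetD … 0: exact wherever Python returns (Pre_).
def xor_parts_alt (shellcode : List Int) (xor_keys : List Int) : List Int :=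
  let n := PySem.List.len shellcode
  (PySem.List.enumerate shellcode).map (fun p =>
    if p.2 = 204 ∧ p.1 + 1 < n ∧ PySem.List.pyGetD shellcode (p.1 + 1) 0 = 144 then p.2
    else PySem.Int.bxor p.2 (PySem.List.pyGetD xor_keys p.1 0))

-- ===== PRECONDITION & SPEC =====
-- Pre_ excludes exactly the inputs where Python A raises IndexError: a trailing 0xcc byte
-- (find_0xcc reads list[i+1] past the end) or a non-marker index with no xor_keys entry.
def Pre_xor_parts (shellcode : List Int) (xor_keys : List Int) : Prop :=
  shellcode.getLast? ≠ some 204 ∧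
  ∀ i ∈ List.range shellcode.length,
    ((shellcode[i]? = some 204 ∧ shellcode[i + 1]? = some 144) ∨ i < xor_keys.length)
instance (shellcode : List Int) (xor_keys : List Int) : Decidable (Pre_xor_parts shellcode xor_keys) := by
  unfold Pre_xor_parts; infer_instance

def pvWitness_xor_parts : List Int × List Int := ([204, 144, 1], [7, 8, 9])

-- When the last shellcode byte is 0xcc (and xor_keys covers every non-marker index) A's
-- find_0xcc raises IndexError on list[i+1]; B returns the list with that final byte XORed.
def Raises_xor_parts (shellcode : List Int) (xor_keys : List Int) : Prop :=
  shellcode.getLast? = some 204 ∧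
  ∀ i ∈ List.range shellcode.length,
    ((shellcode[i]? = some 204 ∧ shellcode[i + 1]? = some 144) ∨ i < xor_keys.length)
instance (shellcode : List Int) (xor_keys : List Int) : Decidable (Raises_xor_parts shellcode xor_keys) := by
  unfold Raises_xor_parts; infer_instance

def pvRaiseWitness_xor_parts : List Int × List Int := ([204], [5])
def pvRaiseWitnessOut_xor_parts : List Int := [201]

def Spec_xor_parts (shellcode : List Int) (xor_keys : List Int) (out : List Int) : Prop := out = xor_parts_alt shellcode xor_keys
instance (shellcode : List Int) (xor_keys : List Int) (out : List Int) : Decidable (Spec_xor_parts shellcode xor_keys out) := by unfold Spec_xor_parts; infer_instance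

-- ===== CLAIM (what is proved, stated in full; the proofs are below) =====
def Claim_equal_xor_parts : Prop := ∀ (shellcode : List Int) (xor_keys : List Int), Dom_xor_parts shellcode xor_keys → Pre_xor_parts shellcode xor_keys → Spec_xor_parts shellcode xor_keys (xor_parts shellcode xor_keys)

def Claim_raises_xor_parts : Prop := (∀ (shellcode : List Int) (xor_keys : List Int), Dom_xor_parts shellcode xor_keys → Raises_xor_parts shellcode xor_keys → ¬ Pre_xor_parts shellcode xor_keys) ∧ (Dom_xor_parts (pvRaiseWitness_xor_parts.1) (pvRaiseWitness_xor_parts.2) ∧ Raises_xor_parts (pvRaiseWitness_xor_parts.1) (pvRaiseWitness_xor_parts.2) ∧ xor_parts_alt (pvRaiseWitness_xor_parts.1) (pvRaiseWitness_xor_parts.2) = pvRaiseWitnessOut_xor_parts)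

-- ===== LEMMAS AND PROOFS =====

-- membership in A's precomputed marker list
theorem mem_find_0xcc (sc : List Int) (i : Int) :
    i ∈ find_0xcc sc ↔
      (0 ≤ i ∧ i < PySem.List.len sc ∧
       PySem.List.pyGetD sc i 0 = 204 ∧ PySem.List.pyGetD sc (i + 1) 0 = 144) := by
  unfold find_0xcc
  rw [PySem.List.foldl_append_ite_eq_filter]
  simp [List.mem_filter, PySem.List.mem_pyRange_one]
  tauto

-- A's output loop as a map over the index range
theorem xor_parts_eq_map (sc ks : List Int) :
    xor_parts sc ks =
      (PySem.List.pyRange 0 (PySem.List.len sc) 1).map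
        (fun i => if i ∈ find_0xcc sc then PySem.List.pyGetD sc i 0
                  else PySem.Int.bxor (PySem.List.pyGetD sc i 0) (PySem.List.pyGetD ks i 0)) := by
  unfold xor_parts
  have h : (fun (res : List Int) (i : Int) =>
      if i ∈ find_0xcc sc then res ++ [PySem.List.pyGetD sc i 0]
      else res ++ [PySem.Int.bxor (PySem.List.pyGetD sc i 0) (PySem.List.pyGetD ks i 0)]) =
      (fun (res : List Int) (i : Int) =>
        res ++ [if i ∈ find_0xcc sc then PySem.List.pyGetD sc i 0
                else PySem.Int.bxor (PySem.List.pyGetD sc i 0) (PySem.List.pyGetD ks i 0)]) := by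
    funext res i
    by_cases hm : i ∈ find_0xcc sc <;> simp [hm]
  simp only [h, PySem.List.foldl_append_singleton_eq_map, List.nil_append]

-- an out-of-range default read can never produce 144
theorem pyGetD_eq_144_lt (sc : List Int) (j : Int) (h : PySem.List.pyGetD sc j 0 = 144) (_hj : 0 ≤ j) :
    j < PySem.List.len sc := by
  by_contra hge
  have hnone : PySem.List.pyGet? sc j = none := by
    rw [PySem.List.pyGet?_eq_none_iff]
    intro hr
    rcases hr with ⟨_, h2⟩
    simp [PySem.List.len_eq] at hge
    omega
  rw [PySem.List.pyGetD_of_none _ _ _ hnone] at h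
  exact absurd h (by norm_num)

theorem xor_parts_eq_alt (sc ks : List Int) : xor_parts sc ks = xor_parts_alt sc ks := by
  rw [xor_parts_eq_map]
  unfold xor_parts_alt
  rw [PySem.List.enumerate_eq_map_pyRange (d := 0), List.map_map]
  apply List.map_congr_left
  intro i hi
  rw [PySem.List.mem_pyRange_one] at hi
  simp only [Function.comp]
  congr 1
  simp only [mem_find_0xcc, eq_iff_iff]
  constructor
  · rintro ⟨_, _, h1, h2⟩
    exact ⟨h1, pyGetD_eq_144_lt sc (i + 1) h2 (by omega), h2⟩
  · rintro ⟨h1, _, h2⟩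
    exact ⟨hi.1, hi.2, h1, h2⟩

-- ===== VERDICT (by name: the statement is the Claim_ definition above) =====
theorem xor_parts_spec : Claim_equal_xor_parts := by
  intro sc ks _ _
  unfold Spec_xor_parts
  exact xor_parts_eq_alt sc ks

@[simp] theorem xor_parts_raises : Claim_raises_xor_parts := by
  unfold Claim_raises_xor_parts
  refine ⟨?_, by decide⟩
  intro sc ks _ hr hp
  exact hp.1 hr.1
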